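-- pv_equiv track=rewrite | github.com/sksmslhy/Java_Lexical_and_Syntax_Analyzer | syntax analyzer/lexical_analyzer.py | checkSingleQuote
-- ===== SOURCE A (Python) =====
-- def checkSingleQuote(string_list: list):
--     result = []
--     temp = []
--     checkOn = False
--     for i in string_list:
--         if i == "'":
--             if checkOn == True:
--                 temp.append("'")
--                 result.append(''.join(temp))
--                 temp = []
--                 checkOn = False
--             elif checkOn == False:
--                 checkOn = True
--                 temp.append("'")
--         else:
--             if checkOn == False:
--                 result.append(i)
--             elif checkOn == True:
--                 temp.append(i)
--     # List 반환
--     return result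
-- ===== SOURCE B (Python) =====
-- def checkSingleQuote(string_list: list):
--     # Recursive decomposition: split at the first quote pair, emit the prefix,
--     # one joined token for the pair, and recurse on the remainder; a trailing
--     # unclosed quote drops everything from it onward.
--     if "'" not in string_list:
--         return list(string_list)
--     k = string_list.index("'")
--     rest = string_list[k + 1:]
--     if "'" not in rest:
--         return string_list[:k]
--     m = rest.index("'")
--     token = ''.join(string_list[k:k + m + 2])
--     return string_list[:k] + [token] + checkSingleQuote(string_list[k + m + 2:])
-- ===== Notes on version B (the rewrite author's own statement) =====
-- stated objective: simpler
-- what changed: Replaces A's single-pass three-variable state machine (result/temp/checkOn flag) by a recursive decomposition that finds the first quote pair with index(), emits the prefix plus one joined token, and recurses on the remainder; an unclosed trailing quote just returns the prefix.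
import Mathlib
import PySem

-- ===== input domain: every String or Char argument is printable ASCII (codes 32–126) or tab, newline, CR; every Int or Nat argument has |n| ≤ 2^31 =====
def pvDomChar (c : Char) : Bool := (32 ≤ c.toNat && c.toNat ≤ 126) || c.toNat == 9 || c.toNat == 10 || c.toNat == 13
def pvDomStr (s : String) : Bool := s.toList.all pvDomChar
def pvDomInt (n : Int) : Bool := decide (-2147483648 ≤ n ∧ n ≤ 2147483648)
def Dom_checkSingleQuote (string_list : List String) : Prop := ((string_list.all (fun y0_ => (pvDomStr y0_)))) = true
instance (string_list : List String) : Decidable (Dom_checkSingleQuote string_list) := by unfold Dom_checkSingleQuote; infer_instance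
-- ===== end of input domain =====

-- B replaces A's three-variable state machine by a recursive split at the first quote pair
-- (same values everywhere; objective: simpler decomposition, not faster).

-- ===== PORT A =====
-- one loop iteration of A: the two nested if/elif chains, in Python's branch order
def csqStep (st : List String × List String × Bool) (i : String) :
    List String × List String × Bool :=
  if i == "'" then
    if st.2.2 = true then (st.1 ++ [String.join (st.2.1 ++ ["'"])], ([], false))
    else (st.1, (st.2.1 ++ ["'"], true))
  else
    if st.2.2 = false then (st.1 ++ [i], (st.2.1, st.2.2))
    else (st.1, (st.2.1 ++ [i], st.2.2))

def checkSingleQuote (string_list : List String) : List String :=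
  (string_list.foldl csqStep ([], ([], false))).1

-- ===== PORT B =====
-- list.index is ported as List.findIdx; exact here because each call is guarded by a
-- containment test, so ValueError is unreachable.  Python slices string_list[:k],
-- string_list[k+1:], string_list[k:k+m+2] have nonnegative in-range bounds and are
-- ported exactly as take/drop.
def checkSingleQuote_alt (string_list : List String) : List String :=
  if h : string_list.contains "'" = false then string_list
  else
    let k := string_list.findIdx (· == "'")
    let rest := string_list.drop (k + 1)
    if rest.contains "'" = false then string_list.take k
    else
      let m := rest.findIdx (· == "'")
      let token := String.join ((string_list.drop k).take (m + 2))
      string_list.take k ++ [token] ++ checkSingleQuote_alt (string_list.drop (k + m + 2))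
termination_by string_list.length
decreasing_by
  have hne : string_list ≠ [] := by
    intro hnil; rw [hnil] at h; simp at h
  have : 0 < string_list.length := List.length_pos_iff.mpr hne
  simp [List.length_drop]; omega

-- ===== PRECONDITION & SPEC =====
def Spec_checkSingleQuote (string_list : List String) (out : List String) : Prop := out = checkSingleQuote_alt string_list
instance (string_list : List String) (out : List String) : Decidable (Spec_checkSingleQuote string_list out) := by unfold Spec_checkSingleQuote; infer_instance

-- ===== CLAIM (what is proved, stated in full; the proofs are below) =====
def Claim_equal_checkSingleQuote : Prop := ∀ (string_list : List String), Dom_checkSingleQuote string_list → Spec_checkSingleQuote string_list (checkSingleQuote string_list)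

-- ===== LEMMAS AND PROOFS =====

-- a quote-free run with checkOn = false is appended element by element to result
theorem csq_run_false (l : List String) (res temp : List String)
    (hl : ∀ x ∈ l, (x == "'") = false) :
    l.foldl csqStep (res, (temp, false)) = (res ++ l, (temp, false)) := by
  induction l generalizing res with
  | nil => simp
  | cons a l ih =>
      have ha : (a == "'") = false := hl a (List.mem_cons_self ..)
      have hl' : ∀ x ∈ l, (x == "'") = false := fun x hx => hl x (List.mem_cons_of_mem _ hx)
      simp [List.foldl_cons, csqStep, ha, ih _ hl']

-- a quote-free run with checkOn = true is appended element by element to temp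
theorem csq_run_true (l : List String) (res temp : List String)
    (hl : ∀ x ∈ l, (x == "'") = false) :
    l.foldl csqStep (res, (temp, true)) = (res, (temp ++ l, true)) := by
  induction l generalizing temp with
  | nil => simp
  | cons a l ih =>
      have ha : (a == "'") = false := hl a (List.mem_cons_self ..)
      have hl' : ∀ x ∈ l, (x == "'") = false := fun x hx => hl x (List.mem_cons_of_mem _ hx)
      simp [List.foldl_cons, csqStep, ha, ih _ hl']

-- result already committed is a pure prefix of whatever the rest of the loop produces
theorem csq_prefix (l : List String) (res temp : List String) (c : Bool) :
    (l.foldl csqStep (res, (temp, c))).1 = res ++ (l.foldl csqStep ([], (temp, c))).1 := by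
  induction l generalizing res temp c with
  | nil => simp
  | cons a l ih =>
      have hstep : ∀ i, csqStep (res, (temp, c)) i
          = (res ++ (csqStep ([], (temp, c)) i).1, (csqStep ([], (temp, c)) i).2) := by
        intro i
        by_cases hi : (i == "'") = true <;> cases c <;> simp [csqStep, hi]
      rw [List.foldl_cons, List.foldl_cons, hstep]
      rcases hst : csqStep ([], (temp, c)) a with ⟨d, t2, c2⟩
      dsimp only
      rw [ih]
      conv_rhs => rw [ih]
      rw [List.append_assoc]

theorem contains_false_iff (l : List String) :
    l.contains "'" = false ↔ ∀ x ∈ l, (x == "'") = false := by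
  simp only [beq_eq_false_iff_ne, ne_eq]
  constructor
  · intro h x hx hxq
    exact (by simpa using h : ¬ "'" ∈ l) (hxq ▸ hx)
  · intro h
    have : ¬ "'" ∈ l := fun hx => h "'" hx rfl
    simpa using this

-- main equivalence, by strong induction on the length of the list
theorem csq_eq (l : List String) : checkSingleQuote l = checkSingleQuote_alt l := by
  induction hn : l.length using Nat.strong_induction_on generalizing l with
  | _ n ih =>
  subst hn
  by_cases h1 : l.contains "'" = false
  · -- no quote anywhere: both return the list itself
    rw [checkSingleQuote_alt]
    simp only [h1, dif_pos]
    have := csq_run_false l [] [] ((contains_false_iff l).mp h1)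
    simp [checkSingleQuote, this]
  · -- first quote at index k
    have hk : l.findIdx (· == "'") < l.length := by
      rw [List.findIdx_lt_length]
      rcases (by simpa [List.contains_eq_any_beq, List.any_eq_true, eq_comm] using h1 :
        ∃ x ∈ l, x = "'") with ⟨x, hx, rfl⟩
      exact ⟨_, hx, by simp⟩
    set k := l.findIdx (· == "'") with hkdef
    have hgetk : l[k]'hk = "'" := by
      have := List.findIdx_getElem (xs := l) (p := (· == "'")) (w := hk)
      simpa using this
    have hP : ∀ x ∈ l.take k, (x == "'") = false := by
      intro x hx
      rcases List.mem_take_iff_getElem.mp hx with ⟨i, hi, rfl⟩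
      exact List.not_of_lt_findIdx (lt_min_iff.mp hi).1
    set R := l.drop (k + 1) with hRdef
    have hsplit : l = l.take k ++ "'" :: R := by
      conv_lhs => rw [← List.take_append_drop k l]
      rw [← List.getElem_cons_drop hk, hgetk]
    have hklen : (l.take k).length = k := by simp [List.length_take]; omega
    by_cases h2 : R.contains "'" = false
    · -- unmatched final quote: A discards temp, B returns the prefix
      have hA : checkSingleQuote l = l.take k := by
        rw [checkSingleQuote]
        conv_lhs => rw [hsplit]
        rw [List.foldl_append, csq_run_false _ _ _ hP]
        simp only [List.foldl_cons, csqStep]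
        simp [csq_run_true _ _ _ ((contains_false_iff R).mp h2)]
      rw [hA, checkSingleQuote_alt]
      rw [dif_neg h1]
      simp only [← hkdef, ← hRdef, h2, if_true]
    · -- second quote at index m of R: one token, then recurse
      have hm : R.findIdx (· == "'") < R.length := by
        rw [List.findIdx_lt_length]
        rcases (by simpa [List.contains_eq_any_beq, List.any_eq_true, eq_comm] using h2 :
          ∃ x ∈ R, x = "'") with ⟨x, hx, rfl⟩
        exact ⟨_, hx, by simp⟩
      set m := R.findIdx (· == "'") with hmdef
      have hgetm : R[m]'hm = "'" := by
        have := List.findIdx_getElem (xs := R) (p := (· == "'")) (w := hm)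
        simpa using this
      have hQ : ∀ x ∈ R.take m, (x == "'") = false := by
        intro x hx
        rcases List.mem_take_iff_getElem.mp hx with ⟨i, hi, rfl⟩
        exact List.not_of_lt_findIdx (lt_min_iff.mp hi).1
      set S := R.drop (m + 1) with hSdef
      have hRsplit : R = R.take m ++ "'" :: S := by
        conv_lhs => rw [← List.take_append_drop m R]
        rw [← List.getElem_cons_drop hm, hgetm]
      have hmlen : (R.take m).length = m := by simp [List.length_take]; omega
      -- the dropped tail after the pair is exactly S
      have hdropS : l.drop (k + m + 2) = S := by
        rw [hSdef, hRdef, List.drop_drop]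
        congr 1
        omega
      -- the token slice is exactly "'" :: R.take m ++ ["'"]
      have hdropk : l.drop k = "'" :: R := by
        rw [← List.getElem_cons_drop hk, hgetk]
      have hRtake : R.take (m + 1) = R.take m ++ ["'"] := by
        rw [List.take_add_one]
        simp [List.getElem?_eq_getElem hm, hgetm]
      have htok : (l.drop k).take (m + 2) = "'" :: (R.take m ++ ["'"]) := by
        rw [hdropk, List.take_succ_cons, hRtake]
      -- A's value
      have hA : checkSingleQuote l
          = l.take k ++ [String.join ("'" :: (R.take m ++ ["'"]))] ++ checkSingleQuote S := by
        rw [checkSingleQuote]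
        conv_lhs => rw [hsplit, hRsplit]
        rw [List.foldl_append, csq_run_false _ _ _ hP, List.foldl_cons]
        have hstep1 : csqStep ([] ++ l.take k, ([], false)) "'" = (l.take k, (["'"], true)) := by
          simp [csqStep]
        rw [hstep1, List.foldl_append, csq_run_true _ _ _ hQ, List.foldl_cons]
        have hstep2 : csqStep (l.take k, (["'"] ++ R.take m, true)) "'"
            = (l.take k ++ [String.join ("'" :: (R.take m ++ ["'"]))], ([], false)) := by
          simp [csqStep]
        rw [hstep2, csq_prefix]
        simp [checkSingleQuote]
      -- lengths for the induction hypothesis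
      have hSlt : S.length < l.length := by
        have h0 : 0 < l.length := by
          rcases l with _ | _
          · simp at h1
          · simp
        simp only [hSdef, hRdef, List.length_drop]
        omega
      have hIH : checkSingleQuote S = checkSingleQuote_alt S :=
        ih S.length hSlt S rfl
      rw [hA, hIH]
      conv_rhs => rw [checkSingleQuote_alt, dif_neg h1]
      simp only [← hkdef, ← hRdef]
      rw [if_neg h2]
      simp only [← hmdef, htok, hdropS]

-- ===== VERDICT (by name: the statement is the Claim_ definition above) =====
theorem checkSingleQuote_spec : Claim_equal_checkSingleQuote := by
  intro l _
  unfold Spec_checkSingleQuote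
  exact csq_eq l
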